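-- pv_equiv track=rewrite | github.com/AlxndrJhn/adventofcode2023 | 10/day.py | horizontal_changes
-- ===== SOURCE A (Python) =====
-- h = "-"
--
-- v = "|"
--
-- L = "L"
--
-- J = "J"
--
-- _7 = "7"
--
-- F = "F"
--
-- def horizontal_changes(cells, vals):
--     cells_used = [cells[i] for i in range(len(cells)) if vals[i] > -1]
--     cells_str = "".join(cells_used)
--     cells_str = cells_str.replace(v, "")
--     count_changes = 0
--     vert_changes = [h, _7 + L, F + J]
--     for vert in vert_changes:
--         count_changes += cells_str.count(vert)
--     return count_changes
-- ===== SOURCE B (Python) =====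
-- def horizontal_changes(cells, vals):
--     # one linear pass: state machine over the characters, tracking the last
--     # non-'|' character seen; counts '-' plus adjacent pairs '7L' and 'FJ'.
--     count = 0
--     prev = None
--     for i in range(len(cells)):
--         if vals[i] > -1:
--             for ch in cells[i]:
--                 if ch == '|':
--                     continue
--                 if ch == '-':
--                     count += 1
--                 elif prev is not None and prev + ch in ('7L', 'FJ'):
--                     count += 1
--                 prev = ch
--     return count
-- ===== Notes on version B (the rewrite author's own statement) =====
-- stated objective: alternative
-- what changed: A builds the selected string, deletes '|' with replace, and makes three separate str.count scans; B is a single state-machine pass over the characters that tracks the previous non-'|' character and counts '-' and the adjacent pairs '7L'/'FJ' on the fly, building no intermediate strings.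
import Mathlib
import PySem

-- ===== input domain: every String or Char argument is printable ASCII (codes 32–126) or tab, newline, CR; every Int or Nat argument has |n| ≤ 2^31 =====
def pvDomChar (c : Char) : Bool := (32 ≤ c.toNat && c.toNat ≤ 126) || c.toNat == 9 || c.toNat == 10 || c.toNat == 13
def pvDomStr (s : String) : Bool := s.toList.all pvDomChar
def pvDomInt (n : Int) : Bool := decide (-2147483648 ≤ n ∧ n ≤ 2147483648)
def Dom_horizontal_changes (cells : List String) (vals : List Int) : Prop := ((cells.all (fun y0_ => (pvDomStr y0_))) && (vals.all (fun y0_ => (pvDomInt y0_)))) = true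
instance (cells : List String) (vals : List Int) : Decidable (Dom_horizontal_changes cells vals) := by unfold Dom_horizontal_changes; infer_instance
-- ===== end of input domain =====

-- B replaces A's string-build + '|'-replace + three str.count scans by a single state-machine
-- pass over the characters (an alternative decomposition); same return value wherever A returns.

-- ===== PORT A =====
def horizontal_changes (cells : List String) (vals : List Int) : Int :=
  let cells_used := (PySem.List.pyRange 0 (cells.length : Int)).foldl
    (fun acc i => if PySem.List.pyGetD vals i 0 > -1 then acc ++ [PySem.List.pyGetD cells i ""] else acc) []
  let cells_str := PySem.Str.join "" cells_used
  let cells_str2 := PySem.Str.replace cells_str "|" ""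
  let vert_changes : List String := ["-", "7L", "FJ"]   -- h, _7 + L, F + J (concatenated string literals)
  vert_changes.foldl (fun acc vert => acc + (PySem.Str.count cells_str2 vert : Int)) 0

-- ===== PORT B =====
-- one step of Source B's state machine: state = (count, prev)
def hcStep (st : Int × Option Char) (ch : Char) : Int × Option Char :=
  if ch = '|' then st
  else if ch = '-' then (st.1 + 1, some ch)
  else
    match st.2 with
    | some p => if (p = '7' ∧ ch = 'L') ∨ (p = 'F' ∧ ch = 'J') then (st.1 + 1, some ch) else (st.1, some ch)
    | none => (st.1, some ch)

def horizontal_changes_alt (cells : List String) (vals : List Int) : Int :=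
  ((PySem.List.pyRange 0 (cells.length : Int)).foldl
    (fun st i => if PySem.List.pyGetD vals i 0 > -1
        then (PySem.List.pyGetD cells i "").toList.foldl hcStep st else st)
    ((0 : Int), (none : Option Char))).1

-- ===== PRECONDITION & SPEC =====
-- Pre_ excludes exactly the inputs where A raises IndexError (vals shorter than cells).
def Pre_horizontal_changes (cells : List String) (vals : List Int) : Prop := cells.length ≤ vals.length
instance (cells : List String) (vals : List Int) : Decidable (Pre_horizontal_changes cells vals) := by unfold Pre_horizontal_changes; infer_instance
def pvWitness_horizontal_changes : List String × List Int := (["F|", "J-7", "L"], [0, 1, -2])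

def Spec_horizontal_changes (cells : List String) (vals : List Int) (out : Int) : Prop := out = horizontal_changes_alt cells vals
instance (cells : List String) (vals : List Int) (out : Int) : Decidable (Spec_horizontal_changes cells vals out) := by unfold Spec_horizontal_changes; infer_instance

-- ===== CLAIM (what is proved, stated in full; the proofs are below) =====
def Claim_equal_horizontal_changes : Prop := ∀ (cells : List String) (vals : List Int), Dom_horizontal_changes cells vals → Pre_horizontal_changes cells vals → Spec_horizontal_changes cells vals (horizontal_changes cells vals)

-- ===== LEMMAS AND PROOFS =====

-- the cells selected by `vals[i] > -1`, as a structural recursion over both lists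
def pvSel : List String → List Int → List String
  | c :: cs, v :: vs => if v > -1 then c :: pvSel cs vs else pvSel cs vs
  | _, _ => []

-- both ports' outer loop over range(len(cells)) is a fold over the selected cells
theorem pvFoldRange {σ : Type} (step : σ → String → σ) :
    ∀ (cells : List String) (vals : List Int), cells.length ≤ vals.length → ∀ (init : σ),
    (List.range cells.length).foldl
      (fun s k => if vals.getD k 0 > -1 then step s (cells.getD k "") else s) init
    = (pvSel cells vals).foldl step init := by
  intro cells
  induction cells with
  | nil => intro vals h init; simp [pvSel]
  | cons c cs ih =>
    intro vals h init
    cases vals with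
    | nil => simp at h
    | cons v vs =>
      simp only [List.length_cons]
      rw [List.range_succ_eq_map]
      simp only [List.foldl_cons, List.foldl_map, List.getD_cons_zero, Nat.succ_eq_add_one,
        List.getD_cons_succ]
      by_cases hv : v > -1
      · rw [if_pos hv, ih vs (by simpa using h) (step init c)]
        simp [pvSel, hv]
      · rw [if_neg hv, ih vs (by simpa using h) init]
        simp [pvSel, hv]

def pvBar (c : Char) : Bool := !(c == '|')

-- per-character contribution of the machine, as a count over a bar-free list
def pvG : Option Char → List Char → Nat
  | _, [] => 0
  | p, c :: t =>
    ((if c = '-' then 1 else 0) +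
     (match p with
      | some q => if (q = '7' ∧ c = 'L') ∨ (q = 'F' ∧ c = 'J') then 1 else 0
      | none => 0)) + pvG (some c) t

def pvLast : Option Char → List Char → Option Char
  | p, [] => p
  | _, c :: t => pvLast (some c) t

theorem pvMachine : ∀ (l : List Char) (st : Int × Option Char),
    l.foldl hcStep st = (st.1 + (pvG st.2 (l.filter pvBar) : Int), pvLast st.2 (l.filter pvBar)) := by
  intro l
  induction l with
  | nil => intro st; simp [pvG, pvLast]
  | cons c t ih =>
    intro st
    by_cases hb : c = '|'
    · subst hb
      have : hcStep st '|' = st := by simp [hcStep]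
      simp [List.foldl_cons, this, ih, pvBar]
    · have hf : (c :: t).filter pvBar = c :: t.filter pvBar := by simp [pvBar, hb]
      rw [List.foldl_cons, ih, hf]
      obtain ⟨n, p⟩ := st
      by_cases hd : c = '-'
      · subst hd
        cases p with
        | none =>
          simp [hcStep, pvG, pvLast]
          all_goals (push_cast; ring)
        | some q =>
          have h1 : ¬ ((q = '7' ∧ '-' = 'L') ∨ (q = 'F' ∧ '-' = 'J')) := by
            rintro (⟨_, h⟩ | ⟨_, h⟩) <;> exact absurd h (by decide)
          simp [hcStep, pvG, pvLast, h1]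
          all_goals (push_cast; ring)
      · cases p with
        | none =>
          simp [hcStep, hb, hd, pvG, pvLast]
          all_goals (push_cast; ring)
        | some q =>
          by_cases hq : (q = '7' ∧ c = 'L') ∨ (q = 'F' ∧ c = 'J')
          · simp [hcStep, hb, hd, pvG, pvLast, hq]
            all_goals (push_cast; ring)
          · simp [hcStep, hb, hd, pvG, pvLast, hq]
            all_goals (push_cast; ring)

-- non-overlapping pair count (the two pattern characters differ, so pairs cannot overlap)
def pvPC (a b : Char) : List Char → Nat
  | x :: y :: t => (if x = a ∧ y = b then 1 else 0) + pvPC a b (y :: t)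
  | _ => 0

def pvOptCons : Option Char → List Char → List Char
  | some q, l => q :: l
  | none, l => l

theorem pvPC_cons_ne (a b x : Char) (t : List Char) (hx : x ≠ a) :
    pvPC a b (x :: t) = pvPC a b t := by
  cases t with
  | nil => simp [pvPC]
  | cons y t' => simp [pvPC, hx]

theorem pvG_eq : ∀ (l : List Char) (p : Option Char),
    pvG p l = l.count '-' + pvPC '7' 'L' (pvOptCons p l) + pvPC 'F' 'J' (pvOptCons p l) := by
  intro l
  induction l with
  | nil => intro p; cases p <;> simp [pvG, pvPC, pvOptCons]
  | cons c t ih =>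
    intro p
    have hcnt : (c :: t).count '-' = (if c = '-' then 1 else 0) + t.count '-' := by
      simp only [List.count_cons, beq_iff_eq]
      split_ifs with hh1 hh2 <;> first | omega | (exfalso; simp_all)
    cases p with
    | none =>
      simp only [pvG, pvOptCons, ih (some c), hcnt]
      omega
    | some q =>
      have h7 : pvPC '7' 'L' (q :: c :: t) = (if q = '7' ∧ c = 'L' then 1 else 0) + pvPC '7' 'L' (c :: t) := by
        simp [pvPC]
      have hF : pvPC 'F' 'J' (q :: c :: t) = (if q = 'F' ∧ c = 'J' then 1 else 0) + pvPC 'F' 'J' (c :: t) := by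
        simp [pvPC]
      simp only [pvG, pvOptCons, ih (some c), hcnt, h7, hF]
      by_cases h1 : q = '7' ∧ c = 'L' <;> by_cases h2 : q = 'F' ∧ c = 'J'
      · exact absurd (h1.2.symm.trans h2.2) (by decide)
      · rw [if_pos h1, if_neg h2, if_pos (Or.inl h1)]
        omega
      · rw [if_neg h1, if_pos h2, if_pos (Or.inr h2)]
        omega
      · rw [if_neg h1, if_neg h2,
          if_neg (show ¬ ((q = '7' ∧ c = 'L') ∨ (q = 'F' ∧ c = 'J')) by tauto)]
        omega

-- Python str.count for a single character is List.count
theorem pvCount1 (c0 : Char) : ∀ (fuel : Nat) (l : List Char) (acc : Nat), l.length ≤ fuel →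
    PySem.Chars.count.go [c0] fuel l acc = acc + l.count c0 := by
  intro fuel
  induction fuel with
  | zero => intro l acc h
            cases l with
            | nil => rw [PySem.Chars.count.go]; simp
            | cons c t => simp at h
  | succ f ih =>
    intro l acc h
    cases l with
    | nil => rw [PySem.Chars.count.go]
             simp
             all_goals (intros; omega)
    | cons c t =>
      rw [PySem.Chars.count.go]
      by_cases hc : c0 = c
      · subst hc
        have hp : [c0].isPrefixOf (c0 :: t) = true := by simp [List.isPrefixOf]
        simp only [hp, if_true, List.length_cons, List.length_nil, List.drop_succ_cons,
          List.drop_zero]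
        rw [ih t (acc + 1) (by simp only [List.length_cons] at h; omega), List.count_cons_self]
        omega
      · have hp : [c0].isPrefixOf (c :: t) = false := by simp [List.isPrefixOf, hc]
        simp only [hp, Bool.false_eq_true, if_false]
        rw [ih t acc (by simp only [List.length_cons] at h; omega)]
        have hne : ¬ c = c0 := fun h' => hc h'.symm
        have hcc : List.count c0 (c :: t) = List.count c0 t := by
          simp [List.count_cons, hc, hne]
        rw [hcc]

-- Python str.count for a two-character pattern with distinct characters is the adjacent-pair count
theorem pvCount2 (a b : Char) (hab : a ≠ b) : ∀ (fuel : Nat) (l : List Char) (acc : Nat), l.length ≤ fuel →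
    PySem.Chars.count.go [a, b] fuel l acc = acc + pvPC a b l := by
  intro fuel
  induction fuel with
  | zero => intro l acc h
            cases l with
            | nil => rw [PySem.Chars.count.go]; simp [pvPC]
            | cons c t => simp at h
  | succ f ih =>
    intro l acc h
    cases l with
    | nil => rw [PySem.Chars.count.go]
             simp [pvPC]
             all_goals (intros; omega)
    | cons c t =>
      rw [PySem.Chars.count.go]
      by_cases hp : [a, b].isPrefixOf (c :: t) = true
      · -- c = a and t = b :: t'
        cases t with
        | nil => simp [List.isPrefixOf] at hp
        | cons y t' =>
          have hca : a = c ∧ b = y := by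
            simpa [List.isPrefixOf] using hp
          obtain ⟨h1, h2⟩ := hca
          subst h1; subst h2
          simp only [hp, if_true, List.length_cons, List.length_nil, List.drop_succ_cons,
            List.drop_zero]
          rw [ih t' (acc + 1) (by simp only [List.length_cons] at h; omega)]
          have hstep : pvPC a b (a :: b :: t') = 1 + pvPC a b (b :: t') := by
            simp [pvPC]
          rw [hstep, pvPC_cons_ne a b b t' (fun h' => hab h'.symm)]
          omega
      · simp only [Bool.not_eq_true] at hp
        simp only [hp, Bool.false_eq_true, if_false]
        rw [ih t acc (by simpa using h)]
        cases t with
        | nil => simp [pvPC]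
        | cons y t' =>
          have hno : ¬ (c = a ∧ y = b) := by
            intro ⟨h1, h2⟩
            subst h1; subst h2
            simp [List.isPrefixOf] at hp
          have : pvPC a b (c :: y :: t') = pvPC a b (y :: t') := by
            simp [pvPC, hno]
          rw [this]

-- str.replace(s, "|", "") is a filter
theorem pvReplace : ∀ (fuel : Nat) (l : List Char) (acc : List Char), l.length ≤ fuel →
    PySem.Chars.replace.go ['|'] [] fuel l acc = acc.reverse ++ l.filter pvBar := by
  intro fuel
  induction fuel with
  | zero => intro l acc h
            cases l with
            | nil => rw [PySem.Chars.replace.go]; simp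
            | cons c t => simp at h
  | succ f ih =>
    intro l acc h
    cases l with
    | nil => rw [PySem.Chars.replace.go]
             simp
             all_goals (intros; omega)
    | cons c t =>
      rw [PySem.Chars.replace.go]
      by_cases hc : c = '|'
      · have hp : ['|'].isPrefixOf (c :: t) = true := by simp [List.isPrefixOf, hc]
        simp only [hp, if_true, List.length_cons, List.length_nil, List.drop_succ_cons,
          List.drop_zero, List.reverse_nil, List.nil_append]
        rw [ih t acc (by simpa using h)]
        simp [pvBar, hc]
      · have hp : ['|'].isPrefixOf (c :: t) = false := by
          simp [List.isPrefixOf]; exact fun h' => absurd h'.symm hc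
        simp only [hp, Bool.false_eq_true, if_false]
        rw [ih t (c :: acc) (by simpa using h)]
        simp [pvBar, hc]

theorem pvInterNil : ∀ (l : List (List Char)), List.intercalate [] l = l.flatten := by
  intro l
  induction l with
  | nil => simp [List.intercalate]
  | cons a t ih =>
    cases t with
    | nil => simp [List.intercalate]
    | cons b t' =>
      simp only [List.intercalate] at ih ⊢
      simp [List.intersperse] at ih ⊢
      simpa using ih

-- the flattened, bar-free character sequence both programs effectively scan
def pvFl (cells : List String) (vals : List Int) : List Char :=
  (((pvSel cells vals).map String.toList).flatten).filter pvBar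

theorem pvA_eq (cells : List String) (vals : List Int) (h : cells.length ≤ vals.length) :
    horizontal_changes cells vals
      = ((pvFl cells vals).count '-' : Int) + (pvPC '7' 'L' (pvFl cells vals) : Int)
        + (pvPC 'F' 'J' (pvFl cells vals) : Int) := by
  unfold horizontal_changes
  rw [PySem.List.pyRange_zero_natCast, List.foldl_map]
  simp only [PySem.List.pyGetD_natCast]
  rw [pvFoldRange (fun s c => s ++ [c]) cells vals h []]
  rw [PySem.List.foldl_append_singleton]
  simp only [List.nil_append]
  have hrep : (PySem.Str.replace (PySem.Str.join "" (pvSel cells vals)) "|" "").toList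
      = pvFl cells vals := by
    rw [PySem.Str.toList_replace, PySem.Str.toList_join]
    have : PySem.Chars.join "".toList (List.map String.toList (pvSel cells vals))
        = ((pvSel cells vals).map String.toList).flatten := by
      show List.intercalate _ _ = _
      have : ("" : String).toList = ([] : List Char) := rfl
      rw [this, pvInterNil]
    rw [this]
    show PySem.Chars.replace _ "|".toList "".toList = _
    have h1 : ("|" : String).toList = ['|'] := rfl
    have h2 : ("" : String).toList = ([] : List Char) := rfl
    rw [h1, h2]
    unfold PySem.Chars.replace
    rw [if_neg (by simp)]
    rw [pvReplace _ _ _ (le_refl _)]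
    simp [pvFl]
  simp only [List.foldl_cons, List.foldl_nil]
  rw [PySem.Str.count_eq, PySem.Str.count_eq, PySem.Str.count_eq, hrep]
  have hc1 : PySem.Chars.count (pvFl cells vals) ("-" : String).toList = (pvFl cells vals).count '-' := by
    have : ("-" : String).toList = ['-'] := rfl
    rw [this]
    unfold PySem.Chars.count
    rw [if_neg (by simp)]
    rw [pvCount1 '-' _ _ 0 (le_refl _)]
    omega
  have hc2 : PySem.Chars.count (pvFl cells vals) ("7L" : String).toList = pvPC '7' 'L' (pvFl cells vals) := by
    have : ("7L" : String).toList = ['7', 'L'] := rfl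
    rw [this]
    unfold PySem.Chars.count
    rw [if_neg (by simp)]
    rw [pvCount2 '7' 'L' (by decide) _ _ 0 (le_refl _)]
    omega
  have hc3 : PySem.Chars.count (pvFl cells vals) ("FJ" : String).toList = pvPC 'F' 'J' (pvFl cells vals) := by
    have : ("FJ" : String).toList = ['F', 'J'] := rfl
    rw [this]
    unfold PySem.Chars.count
    rw [if_neg (by simp)]
    rw [pvCount2 'F' 'J' (by decide) _ _ 0 (le_refl _)]
    omega
  rw [hc1, hc2, hc3]
  ring

theorem pvB_eq (cells : List String) (vals : List Int) (h : cells.length ≤ vals.length) :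
    horizontal_changes_alt cells vals = (pvG none (pvFl cells vals) : Int) := by
  unfold horizontal_changes_alt
  rw [PySem.List.pyRange_zero_natCast, List.foldl_map]
  simp only [PySem.List.pyGetD_natCast]
  rw [pvFoldRange (fun st s => s.toList.foldl hcStep st) cells vals h ((0 : Int), (none : Option Char))]
  have : (pvSel cells vals).foldl (fun st s => s.toList.foldl hcStep st) ((0 : Int), (none : Option Char))
      = (((pvSel cells vals).map String.toList).flatten).foldl hcStep ((0 : Int), (none : Option Char)) := by
    rw [List.foldl_flatten, List.foldl_map]
  rw [this, pvMachine]
  simp [pvFl]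

-- ===== VERDICT (by name: the statement is the Claim_ definition above) =====
theorem horizontal_changes_spec : Claim_equal_horizontal_changes := by
  intro cells vals _ hpre
  unfold Spec_horizontal_changes
  rw [pvA_eq cells vals hpre, pvB_eq cells vals hpre, pvG_eq]
  simp only [pvOptCons]
  push_cast
  ring
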